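-- pv_equiv track=rewrite | github.com/bharath-koteswarao/Algos | src/CodeChef/december_challenge/chef_and_universe.py | convert
-- ===== SOURCE A (Python) =====
-- def convert(p, q, r, x, y, z, a, b, c, memo):
--     if p == x and q == y and r == z:
--         return 0
--     elif p > x or q > y or r > z:
--         return 10 ** 10
--     else:
--         f = a + convert(p + 1, q, r, x, y, z, a, b, c, memo)
--         s = a + convert(p, q + 1, r, x, y, z, a, b, c, memo)
--         t = a + convert(p, q, r + 1, x, y, z, a, b, c, memo)
--         fo = b + convert(p + 1, q + 1, r, x, y, z, a, b, c, memo)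
--         fi = b + convert(p, q + 1, r + 1, x, y, z, a, b, c, memo)
--         si = b + convert(p + 1, q, r + 1, x, y, z, a, b, c, memo)
--         se = c + convert(p + 1, q + 1, r + 1, x, y, z, a, b, c, memo)
--         memo[p][q][r] = min(f, s, t, fo, fi, si, se)
--         return memo[p][q][r]
-- ===== SOURCE B (Python) =====
-- def convert(p, q, r, x, y, z, a, b, c, memo):
--     # Bottom-up DP over offsets (i, j, k) = (p'-p, q'-q, r'-r), one table entry per
--     # box cell instead
--     # of A's recursion.  Returns A's exact value; does not write to memo
--     # (A mutates memo as a side effect; the equivalence is about the return value).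
--     if p == x and q == y and r == z:
--         return 0
--     if p > x or q > y or r > z:
--         return 10 ** 10
--     X, Y, Z = x - p, y - q, z - r
--     INF = 10 ** 10
--     dp = {(0, 0, 0): 0}
--
--     def get(i, j, k):
--         if i < 0 or j < 0 or k < 0:
--             return INF
--         return dp[(i, j, k)]
--
--     for i in range(X + 1):
--         for j in range(Y + 1):
--             for k in range(Z + 1):
--                 if i == 0 and j == 0 and k == 0:
--                     continue
--                 dp[(i, j, k)] = min(a + get(i - 1, j, k),
--                                     a + get(i, j - 1, k),
--                                     a + get(i, j, k - 1),
--                                     b + get(i - 1, j - 1, k),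
--                                     b + get(i, j - 1, k - 1),
--                                     b + get(i - 1, j, k - 1),
--                                     c + get(i - 1, j - 1, k - 1))
--     return dp[(X, Y, Z)]
-- ===== Notes on version B (the rewrite author's own statement) =====
-- stated objective: alternative
-- what changed: Replaced A's plain 7-way branching recursion over grid cells by a bottom-up dynamic-programming table over the offsets (x-p, y-q, z-r), one dictionary entry per box cell; B does not write into memo (A's writes are a side effect A never reads before overwriting, so the return value is unchanged).
import Mathlib
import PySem

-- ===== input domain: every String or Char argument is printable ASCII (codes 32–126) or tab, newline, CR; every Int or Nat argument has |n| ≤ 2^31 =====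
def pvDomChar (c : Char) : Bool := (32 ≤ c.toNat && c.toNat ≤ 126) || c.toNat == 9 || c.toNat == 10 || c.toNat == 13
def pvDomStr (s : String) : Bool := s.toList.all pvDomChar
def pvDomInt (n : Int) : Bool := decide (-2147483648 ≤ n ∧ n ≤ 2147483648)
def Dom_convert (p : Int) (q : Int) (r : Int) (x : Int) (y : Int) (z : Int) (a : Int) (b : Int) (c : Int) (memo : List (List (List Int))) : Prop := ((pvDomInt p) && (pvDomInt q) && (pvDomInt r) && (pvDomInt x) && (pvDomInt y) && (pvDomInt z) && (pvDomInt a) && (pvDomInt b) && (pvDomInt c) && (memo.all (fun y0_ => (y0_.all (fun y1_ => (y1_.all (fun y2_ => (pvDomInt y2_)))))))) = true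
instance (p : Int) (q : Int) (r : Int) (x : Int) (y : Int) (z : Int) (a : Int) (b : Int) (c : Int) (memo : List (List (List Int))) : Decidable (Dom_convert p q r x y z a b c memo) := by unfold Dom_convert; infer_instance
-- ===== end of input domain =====

-- B replaces A's 7-way branching recursion by a bottom-up DP table over the offsets
-- (x-p, y-q, z-r), one dictionary entry per box cell (objective: alternative).  A mutates
-- memo (it only ever reads a cell back immediately after writing it); B does not touch
-- memo: the equivalence proved here is about the RETURN value only.


-- ===== PORT A =====
-- Literal port of A's recursion.  Python's 'memo[p][q][r] = min(...); return memo[p][q][r]'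
-- writes the freshly computed min and immediately reads that same cell back: it is ported
-- as returning that min (exact under Pre_convert, which excludes exactly the inputs on
-- which the Python write raises IndexError; the mutation itself is a side effect outside
-- the return-value claim).
-- The recursion is written with an explicit fuel counter (one more than the maximal
-- recursion depth (x-p)+(y-q)+(z-r), so the 0-fuel branch is unreachable): a totality
-- guard only, the computation is A's.
def convertGo (fuel : Nat) (p : Int) (q : Int) (r : Int) (x : Int) (y : Int) (z : Int) (a : Int) (b : Int) (c : Int) (memo : List (List (List Int))) : Int :=
  match fuel with
  | 0 => 0
  | fuel + 1 =>
    if p = x ∧ q = y ∧ r = z then 0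
    else if x < p ∨ y < q ∨ z < r then 10 ^ 10
    else
      let f  := a + convertGo fuel (p + 1) q r x y z a b c memo
      let s  := a + convertGo fuel p (q + 1) r x y z a b c memo
      let t  := a + convertGo fuel p q (r + 1) x y z a b c memo
      let fo := b + convertGo fuel (p + 1) (q + 1) r x y z a b c memo
      let fi := b + convertGo fuel p (q + 1) (r + 1) x y z a b c memo
      let si := b + convertGo fuel (p + 1) q (r + 1) x y z a b c memo
      let se := c + convertGo fuel (p + 1) (q + 1) (r + 1) x y z a b c memo
      min (min (min (min (min (min f s) t) fo) fi) si) se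

def convert (p : Int) (q : Int) (r : Int) (x : Int) (y : Int) (z : Int) (a : Int) (b : Int) (c : Int) (memo : List (List (List Int))) : Int :=
  convertGo (((x - p) + (y - q) + (z - r)).toNat + 1) p q r x y z a b c memo

-- ===== PORT B =====
-- Source B's 'get': negative offset ⇒ INF, else dp[(i, j, k)] (the key is always present at
-- the moment Source B looks it up — proved below — so Python's KeyError path is unreachable
-- and 'getD 0' is exact).
def altGet (d : PySem.Dict (Int × Int × Int) Int) (i : Int) (j : Int) (k : Int) : Int :=
  if i < 0 ∨ j < 0 ∨ k < 0 then 10 ^ 10 else (d.get? (i, j, k)).getD 0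

-- one iteration of Source B's innermost loop body
def altCell (a : Int) (b : Int) (c : Int) (d : PySem.Dict (Int × Int × Int) Int) (i : Int) (j : Int) (k : Int) : PySem.Dict (Int × Int × Int) Int :=
  if i = 0 ∧ j = 0 ∧ k = 0 then d
  else d.insert (i, j, k)
    (min (min (min (min (min (min (a + altGet d (i - 1) j k) (a + altGet d i (j - 1) k))
      (a + altGet d i j (k - 1))) (b + altGet d (i - 1) (j - 1) k))
      (b + altGet d i (j - 1) (k - 1))) (b + altGet d (i - 1) j (k - 1)))
      (c + altGet d (i - 1) (j - 1) (k - 1)))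

def convert_alt (p : Int) (q : Int) (r : Int) (x : Int) (y : Int) (z : Int) (a : Int) (b : Int) (c : Int) (memo : List (List (List Int))) : Int :=
  if p = x ∧ q = y ∧ r = z then 0
  else if x < p ∨ y < q ∨ z < r then 10 ^ 10
  else
    let X := x - p
    let Y := y - q
    let Z := z - r
    let d0 : PySem.Dict (Int × Int × Int) Int := PySem.Dict.empty.insert (0, 0, 0) 0
    let d := (PySem.List.pyRange 0 (X + 1) 1).foldl (fun d i =>
      (PySem.List.pyRange 0 (Y + 1) 1).foldl (fun d j =>
        (PySem.List.pyRange 0 (Z + 1) 1).foldl (fun d k => altCell a b c d i j k) d) d) d0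
    (d.get? (X, Y, Z)).getD 0

-- ===== PRECONDITION & SPEC =====
-- Pre_convert excludes exactly the inputs on which Python A raises IndexError: when the
-- start cell lies inside the box, A writes memo[p'][q'][r'] at EVERY box cell (p', q', r')
-- except the corner (x, y, z), so each such index chain must be valid in Python's sense
-- (negative-index wraparound included).  Stated over the memo data (bounds per row/cell,
-- enumerating memo itself), so it is checkable even when the box is astronomically large;
-- the 'if … then … - 1 else …' bounds drop exactly the rows/columns only the excluded
-- corner would touch.
def Pre_convert (p : Int) (q : Int) (r : Int) (x : Int) (y : Int) (z : Int) (a : Int) (b : Int) (c : Int) (memo : List (List (List Int))) : Prop :=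
  (p ≤ x ∧ q ≤ y ∧ r ≤ z ∧ ¬(p = x ∧ q = y ∧ r = z)) →
    ((p ≤ (if q = y ∧ r = z then x - 1 else x) →
        -(memo.length : Int) ≤ p ∧ (if q = y ∧ r = z then x - 1 else x) < (memo.length : Int)) ∧
     ∀ tr ∈ PySem.List.enumerate memo 0, ∀ i ∈ [tr.1, tr.1 - (memo.length : Int)],
       p ≤ i → i ≤ (if q = y ∧ r = z then x - 1 else x) →
       ((q ≤ (if i = x ∧ r = z then y - 1 else y) →
           -(tr.2.length : Int) ≤ q ∧ (if i = x ∧ r = z then y - 1 else y) < (tr.2.length : Int)) ∧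
        ∀ uc ∈ PySem.List.enumerate tr.2 0, ∀ j ∈ [uc.1, uc.1 - (tr.2.length : Int)],
          q ≤ j → j ≤ (if i = x ∧ r = z then y - 1 else y) →
          (r ≤ (if i = x ∧ j = y then z - 1 else z) →
            -(uc.2.length : Int) ≤ r ∧ (if i = x ∧ j = y then z - 1 else z) < (uc.2.length : Int))))
instance (p : Int) (q : Int) (r : Int) (x : Int) (y : Int) (z : Int) (a : Int) (b : Int) (c : Int) (memo : List (List (List Int))) : Decidable (Pre_convert p q r x y z a b c memo) := by unfold Pre_convert; infer_instance

def pvWitness_convert : Int × Int × Int × Int × Int × Int × Int × Int × Int × List (List (List Int)) :=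
  (0, 0, 0, 1, 0, 0, 1, 1, 1, [[[0]]])

def Spec_convert (p : Int) (q : Int) (r : Int) (x : Int) (y : Int) (z : Int) (a : Int) (b : Int) (c : Int) (memo : List (List (List Int))) (out : Int) : Prop := out = convert_alt p q r x y z a b c memo
instance (p : Int) (q : Int) (r : Int) (x : Int) (y : Int) (z : Int) (a : Int) (b : Int) (c : Int) (memo : List (List (List Int))) (out : Int) : Decidable (Spec_convert p q r x y z a b c memo out) := by unfold Spec_convert; infer_instance

-- ===== CLAIM (what is proved, stated in full; the proofs are below) =====
def Claim_equal_convert : Prop := ∀ (p : Int) (q : Int) (r : Int) (x : Int) (y : Int) (z : Int) (a : Int) (b : Int) (c : Int) (memo : List (List (List Int))), Dom_convert p q r x y z a b c memo → Pre_convert p q r x y z a b c memo → Spec_convert p q r x y z a b c memo (convert p q r x y z a b c memo)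

-- ===== LEMMAS AND PROOFS =====

-- the common mathematical value: min cost from offset (i, j, k) down to (0, 0, 0)
def V (a : Int) (b : Int) (c : Int) (i : Int) (j : Int) (k : Int) : Int :=
  if i < 0 ∨ j < 0 ∨ k < 0 then 10 ^ 10
  else if i = 0 ∧ j = 0 ∧ k = 0 then 0
  else
    min (min (min (min (min (min (a + V a b c (i - 1) j k) (a + V a b c i (j - 1) k))
      (a + V a b c i j (k - 1))) (b + V a b c (i - 1) (j - 1) k))
      (b + V a b c i (j - 1) (k - 1))) (b + V a b c (i - 1) j (k - 1)))
      (c + V a b c (i - 1) (j - 1) (k - 1))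
termination_by (i + j + k).toNat
decreasing_by all_goals omega

theorem convertGo_eq_V (fuel : Nat) (p q r x y z a b c : Int) (memo : List (List (List Int)))
    (h : ((x - p) + (y - q) + (z - r)).toNat < fuel) :
    convertGo fuel p q r x y z a b c memo = V a b c (x - p) (y - q) (z - r) := by
  induction fuel generalizing p q r with
  | zero => omega
  | succ fuel ih =>
    rw [convertGo]
    by_cases h1 : p = x ∧ q = y ∧ r = z
    · rw [if_pos h1, V, if_neg (by omega), if_pos (by omega)]
    · rw [if_neg h1]
      by_cases h2 : x < p ∨ y < q ∨ z < r
      · rw [if_pos h2, V, if_pos (by omega)]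
      · rw [if_neg h2]
        rw [V, if_neg (by omega), if_neg (by omega)]
        simp only [ih (p + 1) q r (by omega), ih p (q + 1) r (by omega), ih p q (r + 1) (by omega),
          ih (p + 1) (q + 1) r (by omega), ih p (q + 1) (r + 1) (by omega),
          ih (p + 1) q (r + 1) (by omega), ih (p + 1) (q + 1) (r + 1) (by omega),
          show x - (p + 1) = x - p - 1 from by ring,
          show y - (q + 1) = y - q - 1 from by ring,
          show z - (r + 1) = z - r - 1 from by ring]

theorem convert_eq_V (p q r x y z a b c : Int) (memo : List (List (List Int))) :
    convert p q r x y z a b c memo = V a b c (x - p) (y - q) (z - r) := by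
  unfold convert
  exact convertGo_eq_V _ p q r x y z a b c memo (by omega)

-- dict invariant: every in-box cell lexicographically before (i, j, k) (plus the origin)
-- is stored with its V-value
def InvD (a b c X Y Z : Int) (d : PySem.Dict (Int × Int × Int) Int) (i j k : Int) : Prop :=
  ∀ i' j' k', 0 ≤ i' → i' ≤ X → 0 ≤ j' → j' ≤ Y → 0 ≤ k' → k' ≤ Z →
    ((i' = 0 ∧ j' = 0 ∧ k' = 0) ∨ i' < i ∨ (i' = i ∧ j' < j) ∨ (i' = i ∧ j' = j ∧ k' < k)) →
    d.get? (i', j', k') = some (V a b c i' j' k')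

theorem altGet_eq_V (a b c X Y Z : Int) (d : PySem.Dict (Int × Int × Int) Int) (i j k : Int)
    (hInv : InvD a b c X Y Z d i j k)
    (i' j' k' : Int) (hb : i' ≤ X ∧ j' ≤ Y ∧ k' ≤ Z)
    (hlex : (0 ≤ i' ∧ 0 ≤ j' ∧ 0 ≤ k') →
      ((i' = 0 ∧ j' = 0 ∧ k' = 0) ∨ i' < i ∨ (i' = i ∧ j' < j) ∨ (i' = i ∧ j' = j ∧ k' < k))) :
    altGet d i' j' k' = V a b c i' j' k' := by
  unfold altGet
  by_cases hneg : i' < 0 ∨ j' < 0 ∨ k' < 0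
  · rw [if_pos hneg, V, if_pos (by omega)]
  · rw [if_neg hneg, hInv i' j' k' (by omega) hb.1 (by omega) hb.2.1 (by omega) hb.2.2
      (hlex (by omega))]
    rfl

theorem invD_step (a b c X Y Z : Int) (d : PySem.Dict (Int × Int × Int) Int) (i j k : Int)
    (hi : 0 ≤ i) (hiX : i ≤ X) (hj : 0 ≤ j) (hjY : j ≤ Y) (hk : 0 ≤ k) (hkZ : k ≤ Z)
    (hInv : InvD a b c X Y Z d i j k) :
    InvD a b c X Y Z (altCell a b c d i j k) i j (k + 1) := by
  intro i' j' k' h1 h2 h3 h4 h5 h6 hcase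
  unfold altCell
  by_cases horig : i = 0 ∧ j = 0 ∧ k = 0
  · rw [if_pos horig]
    exact hInv i' j' k' h1 h2 h3 h4 h5 h6 (by omega)
  · rw [if_neg horig]
    by_cases heq : (i', j', k') = ((i, j, k) : Int × Int × Int)
    · obtain ⟨hii, hjj, hkk⟩ : i' = i ∧ j' = j ∧ k' = k := by
        simpa [Prod.ext_iff] using heq
      subst hii hjj hkk
      rw [PySem.Dict.get?_insert_self]
      congr 1
      rw [V, if_neg (by omega), if_neg (by omega)]
      rw [altGet_eq_V a b c X Y Z d i' j' k' hInv (i'-1) j' k' (by omega) (by omega),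
          altGet_eq_V a b c X Y Z d i' j' k' hInv i' (j'-1) k' (by omega) (by omega),
          altGet_eq_V a b c X Y Z d i' j' k' hInv i' j' (k'-1) (by omega) (by omega),
          altGet_eq_V a b c X Y Z d i' j' k' hInv (i'-1) (j'-1) k' (by omega) (by omega),
          altGet_eq_V a b c X Y Z d i' j' k' hInv i' (j'-1) (k'-1) (by omega) (by omega),
          altGet_eq_V a b c X Y Z d i' j' k' hInv (i'-1) j' (k'-1) (by omega) (by omega),
          altGet_eq_V a b c X Y Z d i' j' k' hInv (i'-1) (j'-1) (k'-1) (by omega) (by omega)]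
    · rw [PySem.Dict.get?_insert_of_ne _ _ heq]
      apply hInv i' j' k' h1 h2 h3 h4 h5 h6
      have : ¬(i' = i ∧ j' = j ∧ k' = k) := by
        intro h; exact heq (by simp [h.1, h.2.1, h.2.2])
      omega

theorem foldl_range_inv {α : Type} (f : α → Int → α) (P : α → Int → Prop) (n : Int) (hn : 0 ≤ n)
    (hstep : ∀ d t, 0 ≤ t → t < n → P d t → P (f d t) (t + 1)) (d : α) (h0 : P d 0) :
    P ((PySem.List.pyRange 0 n 1).foldl f d) n := by
  have key : ∀ m : Nat, (m : Int) ≤ n → P ((PySem.List.pyRange 0 m 1).foldl f d) m := by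
    intro m
    induction m with
    | zero => intro _; simpa [PySem.List.pyRange_one_eq_nil] using h0
    | succ m ih =>
      intro hm
      have h1 : ((m : Int)) ≤ n := by push_cast at hm ⊢; omega
      have h2 : PySem.List.pyRange 0 ((m : Int) + 1) 1
          = PySem.List.pyRange 0 (m : Int) 1 ++ [(m : Int)] :=
        PySem.List.pyRange_one_succ_right (by positivity)
      push_cast
      rw [h2, List.foldl_append]
      simpa using hstep _ m (by positivity) (by push_cast at hm; omega) (ih h1)
  have := key n.toNat (by omega)
  rwa [Int.toNat_of_nonneg hn] at this

theorem invD_carry_k (a b c X Y Z : Int) (d : PySem.Dict (Int × Int × Int) Int) (i j : Int)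
    (h : InvD a b c X Y Z d i j (Z + 1)) : InvD a b c X Y Z d i (j + 1) 0 := by
  intro i' j' k' h1 h2 h3 h4 h5 h6 hcase
  exact h i' j' k' h1 h2 h3 h4 h5 h6 (by omega)

theorem invD_carry_j (a b c X Y Z : Int) (d : PySem.Dict (Int × Int × Int) Int) (i : Int)
    (h : InvD a b c X Y Z d i (Y + 1) 0) : InvD a b c X Y Z d (i + 1) 0 0 := by
  intro i' j' k' h1 h2 h3 h4 h5 h6 hcase
  exact h i' j' k' h1 h2 h3 h4 h5 h6 (by omega)

theorem invD_loops (a b c X Y Z : Int) (hX : 0 ≤ X) (hY : 0 ≤ Y) (hZ : 0 ≤ Z)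
    (d0 : PySem.Dict (Int × Int × Int) Int) (h0 : InvD a b c X Y Z d0 0 0 0) :
    InvD a b c X Y Z
      ((PySem.List.pyRange 0 (X + 1) 1).foldl (fun d i =>
        (PySem.List.pyRange 0 (Y + 1) 1).foldl (fun d j =>
          (PySem.List.pyRange 0 (Z + 1) 1).foldl (fun d k => altCell a b c d i j k) d) d) d0)
      (X + 1) 0 0 := by
  apply foldl_range_inv _ (fun d i => InvD a b c X Y Z d i 0 0) (X + 1) (by omega) _ _ h0
  intro d i hi hiX hInv
  apply invD_carry_j
  apply foldl_range_inv _ (fun d j => InvD a b c X Y Z d i j 0) (Y + 1) (by omega) _ _ hInv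
  intro d' j hj hjY hInv'
  apply invD_carry_k
  apply foldl_range_inv _ (fun d k => InvD a b c X Y Z d i j k) (Z + 1) (by omega) _ _ hInv'
  intro d'' k hk hkZ hInv''
  exact invD_step a b c X Y Z d'' i j k hi (by omega) hj (by omega) hk (by omega) hInv''

theorem V_zero (a b c : Int) : V a b c 0 0 0 = 0 := by
  rw [V]; simp

theorem convert_alt_eq_V (p q r x y z a b c : Int) (memo : List (List (List Int))) :
    convert_alt p q r x y z a b c memo = V a b c (x - p) (y - q) (z - r) := by
  unfold convert_alt
  by_cases h1 : p = x ∧ q = y ∧ r = z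
  · rw [if_pos h1, V, if_neg (by omega), if_pos (by omega)]
  · rw [if_neg h1]
    by_cases h2 : x < p ∨ y < q ∨ z < r
    · rw [if_pos h2, V, if_pos (by omega)]
    · rw [if_neg h2]
      dsimp only
      have h0 : InvD a b c (x - p) (y - q) (z - r)
          (PySem.Dict.empty.insert ((0 : Int), (0 : Int), (0 : Int)) 0) 0 0 0 := by
        intro i' j' k' _ _ _ _ _ _ hcase
        have : i' = 0 ∧ j' = 0 ∧ k' = 0 := by omega
        obtain ⟨rfl, rfl, rfl⟩ := this
        rw [PySem.Dict.get?_insert_self, V_zero]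
      have hfin := invD_loops a b c (x - p) (y - q) (z - r)
        (by omega) (by omega) (by omega) _ h0
      rw [hfin (x - p) (y - q) (z - r) (by omega) (by omega) (by omega) (by omega)
        (by omega) (by omega) (by omega)]
      rfl

-- ===== VERDICT (by name: the statement is the Claim_ definition above) =====
theorem convert_spec : Claim_equal_convert := by
  intro p q r x y z a b c memo _ _
  unfold Spec_convert
  rw [convert_eq_V, convert_alt_eq_V]
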